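-- pv_equiv track=rewrite | github.com/mb925/pythonScript | makeJson.py | unpToAut
-- ===== SOURCE A (Python) =====
-- def unpToAut(seq, residues, shift):
--
--     unpAut = []
--     i = 1
--     while i <= len(seq):
--
--         resNum = i - shift
--         if resNum in residues:
--            unpAut.append(residues[resNum])
--            i += 1
--         else:
--            unpAut.append('-')
--            i += 1
--     return unpAut
-- ===== SOURCE B (Python) =====
-- def unpToAut(seq, residues, shift):
--     # Scatter pass: start from an all-'-' row and place each residue at its
--     # shifted position, instead of probing the dict at every position.
--     n = len(seq)
--     out = ['-'] * n
--     for k, v in residues.items():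
--         p = k + shift
--         if 1 <= p <= n:
--             out[p - 1] = v
--     return out
-- ===== Notes on version B (the rewrite author's own statement) =====
-- stated objective: alternative
-- what changed: A gathers: for every position i it tests membership of i-shift in the dict and appends the hit or '-'; B scatters: it pre-fills ['-']*len(seq) once and makes a single pass over residues.items(), writing each value at its shifted position k+shift when it lands inside the sequence.
import Mathlib
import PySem

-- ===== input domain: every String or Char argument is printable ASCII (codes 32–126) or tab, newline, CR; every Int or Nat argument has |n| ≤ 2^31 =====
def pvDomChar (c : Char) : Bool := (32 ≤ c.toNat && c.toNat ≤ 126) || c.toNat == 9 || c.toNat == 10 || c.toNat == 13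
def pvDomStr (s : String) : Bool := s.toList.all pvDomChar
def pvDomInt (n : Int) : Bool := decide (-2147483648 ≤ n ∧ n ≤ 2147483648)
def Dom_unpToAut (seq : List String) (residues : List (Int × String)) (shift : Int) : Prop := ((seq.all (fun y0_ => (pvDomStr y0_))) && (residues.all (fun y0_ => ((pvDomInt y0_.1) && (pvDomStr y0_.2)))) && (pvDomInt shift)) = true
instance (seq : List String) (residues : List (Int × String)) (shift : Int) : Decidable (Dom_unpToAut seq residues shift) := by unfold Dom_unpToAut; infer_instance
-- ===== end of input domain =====

-- B replaces A's per-position dict probing by a single scatter pass over the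
-- residue entries into a pre-filled '-' row (alternative decomposition, same cost).


-- ===== PORT A =====
-- the while loop: i runs from 1 while i ≤ len(seq); 'residues[resNum]' is ported as
-- (get? resNum).getD "-" — exact here because the branch is guarded by 'resNum in residues'
-- (the 'fuel' argument only makes the while-loop structurally total: it counts the
-- remaining iterations, one per position, exactly as the loop runs them)
def unpToAutLoop (seq : List String) (d : PySem.Dict Int String) (shift : Int) :
    Nat → Int → List String → List String
  | 0, _, acc => acc
  | fuel + 1, i, acc =>
    if i ≤ (seq.length : Int) then
      let resNum := i - shift
      if d.contains resNum then
        unpToAutLoop seq d shift fuel (i + 1) (acc ++ [(d.get? resNum).getD "-"])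
      else
        unpToAutLoop seq d shift fuel (i + 1) (acc ++ ["-"])
    else acc

def unpToAut (seq : List String) (residues : List (Int × String)) (shift : Int) : List String :=
  unpToAutLoop seq (PySem.Dict.mk residues) shift seq.length 1 []

-- ===== PORT B =====
-- 'out[p-1] = v' : under the guard 1 ≤ p, (p-1).toNat is exactly the Python index p-1
def unpToAutStep (n : Int) (shift : Int) (out : List String) (kv : Int × String) : List String :=
  if 1 ≤ kv.1 + shift ∧ kv.1 + shift ≤ n then out.set (kv.1 + shift - 1).toNat kv.2 else out

def unpToAut_alt (seq : List String) (residues : List (Int × String)) (shift : Int) : List String :=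
  residues.foldl (unpToAutStep (seq.length : Int) shift) (List.replicate seq.length "-")

-- ===== PRECONDITION & SPEC =====
-- Pre_ only states the dict invariant: 'residues' encodes a Python dict, whose keys are
-- distinct; duplicate-key association lists do not arise from any Python input of A.
def Pre_unpToAut (seq : List String) (residues : List (Int × String)) (shift : Int) : Prop :=
  (residues.map Prod.fst).Nodup
instance (seq : List String) (residues : List (Int × String)) (shift : Int) : Decidable (Pre_unpToAut seq residues shift) := by unfold Pre_unpToAut; infer_instance

def pvWitness_unpToAut : List String × (List (Int × String)) × Int :=
  (["M", "K", "V"], [(1, "M"), (3, "V")], 0)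

def Spec_unpToAut (seq : List String) (residues : List (Int × String)) (shift : Int) (out : List String) : Prop := out = unpToAut_alt seq residues shift
instance (seq : List String) (residues : List (Int × String)) (shift : Int) (out : List String) : Decidable (Spec_unpToAut seq residues shift out) := by unfold Spec_unpToAut; infer_instance

-- ===== CLAIM (what is proved, stated in full; the proofs are below) =====
def Claim_equal_unpToAut : Prop := ∀ (seq : List String) (residues : List (Int × String)) (shift : Int), Dom_unpToAut seq residues shift → Pre_unpToAut seq residues shift → Spec_unpToAut seq residues shift (unpToAut seq residues shift)

-- ===== LEMMAS AND PROOFS =====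

-- A's loop, rolled out: it appends one looked-up entry per remaining position
lemma unpToAutLoop_eq (d : PySem.Dict Int String) (shift : Int) :
    ∀ (m : Nat) (seq : List String) (j : Nat) (acc : List String), seq.length = j + m →
    unpToAutLoop seq d shift m ((j : Int) + 1) acc
      = acc ++ (List.range' (j + 1) m).map (fun (i : Nat) => (d.get? ((i : Int) - shift)).getD "-") := by
  intro m
  induction m with
  | zero =>
      intro seq j acc h
      simp [unpToAutLoop]
  | succ m ih =>
      intro seq j acc h
      have hle : (j : Int) + 1 ≤ (seq.length : Int) := by omega
      rw [unpToAutLoop, if_pos hle]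
      by_cases hc : d.contains ((j : Int) + 1 - shift)
      · rw [if_pos hc]
        have := ih seq (j + 1) (acc ++ [(d.get? ((j : Int) + 1 - shift)).getD "-"]) (by omega)
        push_cast at this ⊢
        rw [show (j : Int) + 1 + 1 = ((j : Nat) + 1 : Nat) + 1 by push_cast; ring] at *
        rw [this]
        rw [List.range'_succ]
        simp
      · rw [if_neg hc]
        have hnone : d.get? ((j : Int) + 1 - shift) = none := by
          cases hg : d.get? ((j : Int) + 1 - shift) with
          | none => rfl
          | some v =>
              exfalso; apply hc
              rw [PySem.Dict.contains_eq_isSome_get?, hg]; rfl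
        have := ih seq (j + 1) (acc ++ ["-"]) (by omega)
        rw [show (j : Int) + 1 + 1 = ((j : Nat) + 1 : Nat) + 1 by push_cast; ring] at *
        rw [this]
        rw [List.range'_succ]
        simp [hnone]

lemma scatter_length (n shift : Int) :
    ∀ (rs : List (Int × String)) (out : List String),
    (rs.foldl (unpToAutStep n shift) out).length = out.length := by
  intro rs
  induction rs with
  | nil => intro out; rfl
  | cons kv t ih =>
      intro out
      simp only [List.foldl_cons, ih]
      simp only [unpToAutStep]
      split <;> simp

-- B's scatter loop, read back per index: index j ends up holding the first-match
-- lookup of key j+1-shift (keys are distinct), or the prefilled cell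
lemma scatter_get (n shift : Int) :
    ∀ (rs : List (Int × String)) (out : List String), (rs.map Prod.fst).Nodup →
    (n : Int) = (out.length : Int) →
    ∀ (j : Nat) (hj : j < out.length),
    (rs.foldl (unpToAutStep n shift) out)[j]'(by rw [scatter_length]; exact hj)
      = ((PySem.Dict.mk rs).get? ((j : Int) + 1 - shift)).getD (out[j]'hj) := by
  intro rs
  induction rs with
  | nil =>
      intro out _ _ j hj
      simp [PySem.Dict.get?]
  | cons kv t ih =>
      intro out hnd hn j hj
      obtain ⟨k, v⟩ := kv
      rw [List.map_cons, List.nodup_cons] at hnd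
      obtain ⟨hknot, hnd'⟩ := hnd
      simp only [List.foldl_cons]
      have hlen' : (unpToAutStep n shift out (k, v)).length = out.length := by
        simp only [unpToAutStep]; split <;> simp
      have hj' : j < (unpToAutStep n shift out (k, v)).length := by rw [hlen']; exact hj
      rw [ih (unpToAutStep n shift out (k, v)) hnd' (by rw [hlen']; exact hn) j hj']
      rw [PySem.Dict.get?_mk_cons]
      by_cases hk : k = (j : Int) + 1 - shift
      · rw [if_pos (by exact beq_iff_eq.mpr hk)]
        have hnone : (PySem.Dict.mk t).get? ((j : Int) + 1 - shift) = none := by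
          rw [PySem.Dict.get?_eq_none_iff_not_mem_keys]
          rw [PySem.Dict.keys_mk, ← hk]
          exact hknot
        rw [hnone]
        have hrange : 1 ≤ k + shift ∧ k + shift ≤ n := by omega
        simp only [unpToAutStep, if_pos hrange]
        have hidx : (k + shift - 1).toNat = j := by omega
        simp [hidx]
      · rw [if_neg (by simpa using hk)]
        congr 1
        simp only [unpToAutStep]
        split
        · next hr =>
            rw [List.getElem_set]
            rw [if_neg (by omega)]
        · rfl

-- ===== VERDICT (by name: the statement is the Claim_ definition above) =====
theorem unpToAut_spec : Claim_equal_unpToAut := by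
  intro seq residues shift _ hpre
  unfold Spec_unpToAut unpToAut unpToAut_alt
  have hA := unpToAutLoop_eq (PySem.Dict.mk residues) shift seq.length seq 0 [] (by omega)
  simp only [Nat.cast_zero, zero_add, List.nil_append] at hA
  rw [hA]
  apply List.ext_getElem
  · rw [scatter_length]; simp
  · intro j h1 h2
    have hj : j < seq.length := by simpa using h1
    have hjr : j < (List.replicate seq.length "-").length := by simpa using hj
    rw [scatter_get (seq.length : Int) shift residues (List.replicate seq.length "-") hpre (by simp) j hjr]
    simp only [List.getElem_map, List.getElem_range']
    rw [List.getElem_replicate]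
    congr 2
    push_cast
    ring
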